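-- pv_equiv track=rewrite | github.com/AnhChau2311/TextAnalyzer_Learning_Web | analysis/parser_runner.py | get_token_categories
-- ===== SOURCE A (Python) =====
-- def get_token_categories(tokens: list) -> dict:
--     """
--     Categorize tokens into linguistic groups.
--
--     Returns:
--         A dictionary mapping category names to token lists.
--     """
--     categories = {
--         "politeness": [],
--         "emotions": [],
--         "grammar": [],
--         "content": [],
--         "negation": [],
--         "questions": []
--     }
--
--     politeness_tokens = [
--         "GREETING", "THANK_YOU", "SOFT_WORD", "HEDGE_WORD",
--         "POLITE_VERB", "APOLOGY_WORD", "EMPATHY_WORD"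
--     ]
--
--     emotion_tokens = [
--         "POSITIVE_EMOTION", "NEGATIVE_EMOTION",
--         "POSITIVE_ADJ", "STRONG_WORD", "EMOTICON"
--     ]
--
--     grammar_tokens = [
--         "PRONOUN", "ARTICLE", "PREPOSITION",
--         "CONJUNCTION", "COMMON_VERB", "POSSESSIVE"
--     ]
--
--     negation_tokens = ["NEGATION", "COMMAND_WORD"]
--     question_tokens = ["QUESTION_WORD"]
--
--     for token in tokens:
--         if token in politeness_tokens:
--             categories["politeness"].append(token)
--         if token in emotion_tokens:
--             categories["emotions"].append(token)
--         if token in grammar_tokens: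
--             categories["grammar"].append(token)
--         if token in negation_tokens:
--             categories["negation"].append(token)
--         if token in question_tokens:
--             categories["questions"].append(token)
--         if token == "WORD":
--             categories["content"].append(token)
--
--     return categories
-- ===== SOURCE B (Python) =====
-- _CATEGORY_LISTS = [
--     ("politeness", ["GREETING", "THANK_YOU", "SOFT_WORD", "HEDGE_WORD",
--                     "POLITE_VERB", "APOLOGY_WORD", "EMPATHY_WORD"]),
--     ("emotions", ["POSITIVE_EMOTION", "NEGATIVE_EMOTION",
--                   "POSITIVE_ADJ", "STRONG_WORD", "EMOTICON"]),
--     ("grammar", ["PRONOUN", "ARTICLE", "PREPOSITION",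
--                  "CONJUNCTION", "COMMON_VERB", "POSSESSIVE"]),
--     ("content", ["WORD"]),
--     ("negation", ["NEGATION", "COMMAND_WORD"]),
--     ("questions", ["QUESTION_WORD"]),
-- ]
--
--
-- def get_token_categories(tokens: list) -> dict:
--     """Categorize tokens: one independent filter pass per category.
--
--     Each category's list is, by definition, the subsequence of `tokens`
--     whose elements belong to that category's token set, so six staged
--     filter passes produce exactly the lists A accumulates in its loop.
--     """
--     return {name: [t for t in tokens if t in members]
--             for name, members in _CATEGORY_LISTS}
-- ===== Notes on version B (the rewrite author's own statement) =====
-- stated objective: idiomatic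
-- what changed: Replaced A's single stateful loop that conditionally appends each token into a pre-built six-key dict by six independent staged filter passes (a dict comprehension of per-category filters), with no mutable accumulator at all.
import Mathlib
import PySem

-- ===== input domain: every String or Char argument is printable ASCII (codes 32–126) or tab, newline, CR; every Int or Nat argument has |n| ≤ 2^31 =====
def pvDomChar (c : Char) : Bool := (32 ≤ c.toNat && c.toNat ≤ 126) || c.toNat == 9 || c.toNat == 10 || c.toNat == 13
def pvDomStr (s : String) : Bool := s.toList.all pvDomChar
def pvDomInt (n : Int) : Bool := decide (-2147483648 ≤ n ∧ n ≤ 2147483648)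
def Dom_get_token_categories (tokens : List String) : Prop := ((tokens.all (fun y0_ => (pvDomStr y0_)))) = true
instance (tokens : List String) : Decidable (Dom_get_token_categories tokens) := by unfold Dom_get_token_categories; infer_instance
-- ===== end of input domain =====

-- B replaces A's single stateful accumulator loop by six independent staged filter passes (not faster; different decomposition).

-- ===== PORT A =====
def pvPoliteness : List String :=
  ["GREETING", "THANK_YOU", "SOFT_WORD", "HEDGE_WORD",
   "POLITE_VERB", "APOLOGY_WORD", "EMPATHY_WORD"]
def pvEmotion : List String :=
  ["POSITIVE_EMOTION", "NEGATIVE_EMOTION", "POSITIVE_ADJ", "STRONG_WORD", "EMOTICON"]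
def pvGrammar : List String :=
  ["PRONOUN", "ARTICLE", "PREPOSITION", "CONJUNCTION", "COMMON_VERB", "POSSESSIVE"]
def pvNegation : List String := ["NEGATION", "COMMAND_WORD"]
def pvQuestion : List String := ["QUESTION_WORD"]

def pvInit : PySem.Dict String (List String) :=
  PySem.Dict.mk
    [("politeness", []), ("emotions", []), ("grammar", []),
     ("content", []), ("negation", []), ("questions", [])]

-- the body of A's for-loop: six independent membership checks, each appending
def pvStepA (d : PySem.Dict String (List String)) (token : String) :
    PySem.Dict String (List String) :=
  let d := if pvPoliteness.contains token then d.modify "politeness" [] (· ++ [token]) else d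
  let d := if pvEmotion.contains token then d.modify "emotions" [] (· ++ [token]) else d
  let d := if pvGrammar.contains token then d.modify "grammar" [] (· ++ [token]) else d
  let d := if pvNegation.contains token then d.modify "negation" [] (· ++ [token]) else d
  let d := if pvQuestion.contains token then d.modify "questions" [] (· ++ [token]) else d
  if token == "WORD" then d.modify "content" [] (· ++ [token]) else d

def get_token_categories (tokens : List String) : List (String × List String) :=
  (tokens.foldl pvStepA pvInit).items

-- ===== PORT B =====
-- _CATEGORY_LISTS, and one filter pass of `tokens` per category (the dict comprehension)
def pvCategoryLists : List (String × List String) :=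
  [("politeness", pvPoliteness), ("emotions", pvEmotion), ("grammar", pvGrammar),
   ("content", ["WORD"]), ("negation", pvNegation), ("questions", pvQuestion)]

def get_token_categories_alt (tokens : List String) : List (String × List String) :=
  pvCategoryLists.map (fun nm => (nm.1, tokens.filter (fun t => nm.2.contains t)))

-- ===== PRECONDITION & SPEC =====
def Spec_get_token_categories (tokens : List String) (out : List (String × List String)) : Prop := out = get_token_categories_alt tokens
instance (tokens : List String) (out : List (String × List String)) : Decidable (Spec_get_token_categories tokens out) := by unfold Spec_get_token_categories; infer_instance

-- ===== CLAIM =====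
def Claim_equal_get_token_categories : Prop := ∀ (tokens : List String), Dom_get_token_categories tokens → Spec_get_token_categories tokens (get_token_categories tokens)

-- ===== LEMMAS AND PROOFS =====

-- loop invariant: folding A's step from an arbitrary six-list state appends the six filters
theorem foldl_stepA_items (ts : List String) :
    ∀ (l1 l2 l3 l4 l5 l6 : List String),
    (ts.foldl pvStepA (PySem.Dict.mk
       [("politeness", l1), ("emotions", l2), ("grammar", l3),
        ("content", l4), ("negation", l5), ("questions", l6)])).items =
    [("politeness", l1 ++ ts.filter (fun t => pvPoliteness.contains t)),
     ("emotions", l2 ++ ts.filter (fun t => pvEmotion.contains t)),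
     ("grammar", l3 ++ ts.filter (fun t => pvGrammar.contains t)),
     ("content", l4 ++ ts.filter (fun t => t == "WORD")),
     ("negation", l5 ++ ts.filter (fun t => pvNegation.contains t)),
     ("questions", l6 ++ ts.filter (fun t => pvQuestion.contains t))] := by
  induction ts with
  | nil => intro l1 l2 l3 l4 l5 l6; simp
  | cons t ts ih =>
    intro l1 l2 l3 l4 l5 l6
    have hstep : pvStepA (PySem.Dict.mk
       [("politeness", l1), ("emotions", l2), ("grammar", l3),
        ("content", l4), ("negation", l5), ("questions", l6)]) t =
      PySem.Dict.mk
       [("politeness", if pvPoliteness.contains t then l1 ++ [t] else l1),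
        ("emotions", if pvEmotion.contains t then l2 ++ [t] else l2),
        ("grammar", if pvGrammar.contains t then l3 ++ [t] else l3),
        ("content", if t == "WORD" then l4 ++ [t] else l4),
        ("negation", if pvNegation.contains t then l5 ++ [t] else l5),
        ("questions", if pvQuestion.contains t then l6 ++ [t] else l6)] := by
      unfold pvStepA
      split_ifs <;> rfl
    rw [List.foldl_cons, hstep, ih]
    simp only [List.filter_cons]
    split_ifs <;> simp

-- ===== VERDICT =====
theorem get_token_categories_spec : Claim_equal_get_token_categories := by
  intro tokens _
  show get_token_categories tokens = get_token_categories_alt tokens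
  unfold get_token_categories get_token_categories_alt pvInit pvCategoryLists
  rw [foldl_stepA_items]
  simp only [List.map_cons, List.map_nil, List.nil_append]
  have h : List.filter (fun t : String => t == "WORD") tokens
      = List.filter (fun t => (["WORD"] : List String).contains t) tokens :=
    List.filter_congr (fun a _ => by simp [beq_eq_decide])
  rw [h]
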